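-- pv_equiv track=rewrite | github.com/chinmoyacharjee/Skin-detection | skin_detection_train.py | train_data
-- ===== SOURCE A (Python) =====
-- def check_skin(rgb):
--     r = rgb[0]
--     g = rgb[1]
--     b = rgb[2]
--     if (r <= 150 and g <= 150 and b <= 150): return False
--     return True
--
-- def train_data(pixels, pix_val_actual, pix_val_mask, skin, non_skin):
--
--     for i in range(len(pix_val_actual)):
--
--         r = pix_val_actual[i][0]
--         g = pix_val_actual[i][1]
--         b = pix_val_actual[i][2]
--
--         if(check_skin(pix_val_mask[i])):
--             skin[r][g][b] += 1
--
--         else: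
--             non_skin[r][g][b] += 1
--
--     return pixels, skin, non_skin
-- ===== SOURCE B (Python) =====
-- def check_skin(rgb):
--     r = rgb[0]
--     g = rgb[1]
--     b = rgb[2]
--     if (r <= 150 and g <= 150 and b <= 150): return False
--     return True
--
-- def train_data(pixels, pix_val_actual, pix_val_mask, skin, non_skin):
--     # Pass 1: aggregate occurrence counts per (r,g,b) colour, split by mask class.
--     skin_counts = {}
--     non_counts = {}
--     for px, m in zip(pix_val_actual, pix_val_mask):
--         k = (px[0], px[1], px[2])
--         if check_skin(m):
--             skin_counts[k] = skin_counts.get(k, 0) + 1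
--         else:
--             non_counts[k] = non_counts.get(k, 0) + 1
--     # Pass 2: one in-place update per distinct colour.
--     for (r, g, b), c in skin_counts.items():
--         skin[r][g][b] += c
--     for (r, g, b), c in non_counts.items():
--         non_skin[r][g][b] += c
--     return pixels, skin, non_skin
-- ===== Notes on version B (the rewrite author's own statement) =====
-- stated objective: alternative
-- what changed: Replaces A's per-pixel in-place increment of skin[r][g][b]/non_skin[r][g][b] by a counting pass that aggregates occurrences per distinct (r,g,b) colour into two dicts, followed by one in-place addition per distinct colour per class.
import Mathlib
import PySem

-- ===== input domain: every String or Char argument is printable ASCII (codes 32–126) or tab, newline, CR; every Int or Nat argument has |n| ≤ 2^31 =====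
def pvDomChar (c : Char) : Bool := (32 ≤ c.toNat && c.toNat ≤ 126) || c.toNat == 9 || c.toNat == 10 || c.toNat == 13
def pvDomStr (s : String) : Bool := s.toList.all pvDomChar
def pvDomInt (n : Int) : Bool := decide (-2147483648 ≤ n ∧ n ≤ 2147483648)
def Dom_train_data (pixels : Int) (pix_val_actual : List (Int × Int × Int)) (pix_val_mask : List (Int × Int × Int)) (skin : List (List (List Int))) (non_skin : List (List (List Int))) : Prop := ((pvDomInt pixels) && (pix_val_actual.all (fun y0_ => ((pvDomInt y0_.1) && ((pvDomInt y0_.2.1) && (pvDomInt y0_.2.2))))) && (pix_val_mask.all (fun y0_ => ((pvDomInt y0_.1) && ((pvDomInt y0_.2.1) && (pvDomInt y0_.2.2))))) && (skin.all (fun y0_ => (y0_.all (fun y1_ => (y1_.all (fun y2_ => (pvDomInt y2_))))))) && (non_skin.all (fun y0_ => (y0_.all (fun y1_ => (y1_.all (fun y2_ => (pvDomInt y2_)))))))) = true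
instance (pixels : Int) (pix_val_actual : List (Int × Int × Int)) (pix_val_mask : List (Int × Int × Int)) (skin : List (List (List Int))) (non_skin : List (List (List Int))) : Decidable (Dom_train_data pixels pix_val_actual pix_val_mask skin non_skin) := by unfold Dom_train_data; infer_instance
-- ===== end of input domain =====

-- B replaces A's per-pixel histogram increments by a Counter pass (one count per distinct colour per class)
-- followed by one in-place bump per distinct colour; equivalence is about the RETURN value (both Pythons also
-- mutate skin/non_skin in place identically on inputs where A returns).

-- shared helper, transliteration of the module's check_skin
def check_skin (rgb : Int × Int × Int) : Bool :=
  if rgb.1 ≤ 150 ∧ rgb.2.1 ≤ 150 ∧ rgb.2.2 ≤ 150 then false else true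

-- hand port of Python's `l[i] = f(l[i])` (element `+=`): exact for in-range (incl. negative) index;
-- an out-of-range index raises IndexError in Python — those inputs are excluded by Pre_train_data.
def pyModifyAt {α : Type} (l : List α) (i : Int) (f : α → α) : List α :=
  match PySem.List.pyIdx? l.length i with
  | some n => l.modify n f
  | none => l

-- port of `tbl[r][g][b] += c`
def bumpCell (tbl : List (List (List Int))) (r g b c : Int) : List (List (List Int)) :=
  pyModifyAt tbl r (fun row => pyModifyAt row g (fun col => pyModifyAt col b (fun x => x + c)))

-- ===== PORT A =====
def train_data (pixels : Int) (pix_val_actual : List (Int × Int × Int)) (pix_val_mask : List (Int × Int × Int)) (skin : List (List (List Int))) (non_skin : List (List (List Int))) : Int × List (List (List Int)) × List (List (List Int)) :=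
  let st := (PySem.List.pyRange 0 (pix_val_actual.length : Int)).foldl
    (fun (st : List (List (List Int)) × List (List (List Int))) i =>
      let px := PySem.List.pyGetD pix_val_actual i (0, 0, 0)
      let r := px.1
      let g := px.2.1
      let b := px.2.2
      let m := PySem.List.pyGetD pix_val_mask i (0, 0, 0)
      if check_skin m then (bumpCell st.1 r g b 1, st.2)
      else (st.1, bumpCell st.2 r g b 1))
    (skin, non_skin)
  (pixels, st.1, st.2)

-- ===== PORT B =====
def train_data_alt (pixels : Int) (pix_val_actual : List (Int × Int × Int)) (pix_val_mask : List (Int × Int × Int)) (skin : List (List (List Int))) (non_skin : List (List (List Int))) : Int × List (List (List Int)) × List (List (List Int)) :=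
  let dd := (pix_val_actual.zip pix_val_mask).foldl
    (fun (dd : PySem.Dict (Int × Int × Int) Int × PySem.Dict (Int × Int × Int) Int) pm =>
      let k := (pm.1.1, pm.1.2.1, pm.1.2.2)
      if check_skin pm.2 then (dd.1.insert k (dd.1.getD k 0 + 1), dd.2)
      else (dd.1, dd.2.insert k (dd.2.getD k 0 + 1)))
    (PySem.Dict.empty, PySem.Dict.empty)
  let skin' := dd.1.items.foldl (fun t kc => bumpCell t kc.1.1 kc.1.2.1 kc.1.2.2 kc.2) skin
  let non' := dd.2.items.foldl (fun t kc => bumpCell t kc.1.1 kc.1.2.1 kc.1.2.2 kc.2) non_skin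
  (pixels, skin', non')

-- ===== PRECONDITION & SPEC =====
-- does `tbl[r][g][b]` succeed (Python indexing, negative indices wrap)?
def okCell (tbl : List (List (List Int))) (r g b : Int) : Bool :=
  match PySem.List.pyGet? tbl r with
  | none => false
  | some row =>
    match PySem.List.pyGet? row g with
    | none => false
    | some col => (PySem.List.pyGet? col b).isSome

-- Pre_ = exactly the inputs where Python A returns: the mask covers every actual pixel
-- (else pix_val_mask[i] raises IndexError) and each pixel's (r,g,b) indexes its target table.
def Pre_train_data (pixels : Int) (pix_val_actual : List (Int × Int × Int)) (pix_val_mask : List (Int × Int × Int)) (skin : List (List (List Int))) (non_skin : List (List (List Int))) : Prop :=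
  pix_val_actual.length ≤ pix_val_mask.length ∧
  (pix_val_actual.zip pix_val_mask).all
    (fun p => okCell (if check_skin p.2 then skin else non_skin) p.1.1 p.1.2.1 p.1.2.2) = true
instance (pixels : Int) (pix_val_actual : List (Int × Int × Int)) (pix_val_mask : List (Int × Int × Int)) (skin : List (List (List Int))) (non_skin : List (List (List Int))) : Decidable (Pre_train_data pixels pix_val_actual pix_val_mask skin non_skin) := by unfold Pre_train_data; infer_instance

def pvWitness_train_data : Int × (List (Int × Int × Int)) × (List (Int × Int × Int)) × List (List (List Int)) × List (List (List Int)) :=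
  (5, [(1, 1, 0)], [(200, 200, 200)], [[[0], [0]], [[0], [3]]], [[[0]]])

def Spec_train_data (pixels : Int) (pix_val_actual : List (Int × Int × Int)) (pix_val_mask : List (Int × Int × Int)) (skin : List (List (List Int))) (non_skin : List (List (List Int))) (out : Int × List (List (List Int)) × List (List (List Int))) : Prop := out = train_data_alt pixels pix_val_actual pix_val_mask skin non_skin
instance (pixels : Int) (pix_val_actual : List (Int × Int × Int)) (pix_val_mask : List (Int × Int × Int)) (skin : List (List (List Int))) (non_skin : List (List (List Int))) (out : Int × List (List (List Int)) × List (List (List Int))) : Decidable (Spec_train_data pixels pix_val_actual pix_val_mask skin non_skin out) := by unfold Spec_train_data; infer_instance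

-- ===== CLAIM (what is proved, stated in full; the proofs are below) =====
def Claim_equal_train_data : Prop := ∀ (pixels : Int) (pix_val_actual : List (Int × Int × Int)) (pix_val_mask : List (Int × Int × Int)) (skin : List (List (List Int))) (non_skin : List (List (List Int))), Dom_train_data pixels pix_val_actual pix_val_mask skin non_skin → Pre_train_data pixels pix_val_actual pix_val_mask skin non_skin → Spec_train_data pixels pix_val_actual pix_val_mask skin non_skin (train_data pixels pix_val_actual pix_val_mask skin non_skin)

-- ===== LEMMAS AND PROOFS =====

-- commuting / composing in-place updates
theorem modify_modify_comm {α : Type} (l : List α) (n m : Nat) (f g : α → α)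
    (h : ∀ x, g (f x) = f (g x)) :
    (l.modify n f).modify m g = (l.modify m g).modify n f := by
  apply List.ext_getElem (by simp)
  intro i h1 h2
  simp only [List.getElem_modify]
  by_cases hn : n = i <;> by_cases hm : m = i <;> simp [hn, hm, h]

theorem modify_modify_same {α : Type} (l : List α) (n : Nat) (f g : α → α) :
    (l.modify n f).modify n g = l.modify n (fun x => g (f x)) := by
  apply List.ext_getElem (by simp)
  intro i h1 h2
  simp only [List.getElem_modify]
  by_cases hn : n = i <;> simp [hn]

theorem pyModifyAt_comm {α : Type} (l : List α) (i j : Int) (f g : α → α)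
    (h : ∀ x, g (f x) = f (g x)) :
    pyModifyAt (pyModifyAt l i f) j g = pyModifyAt (pyModifyAt l j g) i f := by
  cases hi : PySem.List.pyIdx? l.length i <;> cases hj : PySem.List.pyIdx? l.length j <;>
    simp [pyModifyAt, hi, hj, List.length_modify] <;>
    exact modify_modify_comm l _ _ f g h

theorem pyModifyAt_comp {α : Type} (l : List α) (i : Int) (f g : α → α) :
    pyModifyAt (pyModifyAt l i f) i g = pyModifyAt l i (fun x => g (f x)) := by
  cases hi : PySem.List.pyIdx? l.length i <;>
    simp [pyModifyAt, hi, List.length_modify, modify_modify_same]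

theorem bumpCell_comm (t : List (List (List Int))) (r g b c r' g' b' c' : Int) :
    bumpCell (bumpCell t r g b c) r' g' b' c' = bumpCell (bumpCell t r' g' b' c') r g b c := by
  unfold bumpCell
  apply pyModifyAt_comm
  intro row
  apply pyModifyAt_comm
  intro col
  apply pyModifyAt_comm
  intro x
  omega

theorem bumpCell_split (t : List (List (List Int))) (r g b c : Int) :
    bumpCell t r g b (c + 1) = bumpCell (bumpCell t r g b c) r g b 1 := by
  unfold bumpCell
  rw [pyModifyAt_comp]
  congr 1
  funext row
  rw [pyModifyAt_comp]
  congr 1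
  funext col
  rw [pyModifyAt_comp]
  congr 1
  funext x
  omega

-- the two fold shapes
def apply1 (ks : List (Int × Int × Int)) (t : List (List (List Int))) : List (List (List Int)) :=
  ks.foldl (fun t k => bumpCell t k.1 k.2.1 k.2.2 1) t

def applyC (ps : List ((Int × Int × Int) × Int)) (t : List (List (List Int))) : List (List (List Int)) :=
  ps.foldl (fun t kc => bumpCell t kc.1.1 kc.1.2.1 kc.1.2.2 kc.2) t

theorem applyC_bump_comm (ps : List ((Int × Int × Int) × Int)) (t : List (List (List Int)))
    (r g b c : Int) :
    applyC ps (bumpCell t r g b c) = bumpCell (applyC ps t) r g b c := by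
  induction ps generalizing t with
  | nil => rfl
  | cons p ps ih => simp only [applyC, List.foldl_cons] at *; rw [bumpCell_comm, ih]

-- CORE: applying the counter's aggregated counts = applying the per-occurrence increments
theorem counter_apply (ks : List (Int × Int × Int)) (t : List (List (List Int))) :
    applyC ((PySem.Set.ofList ks).map (fun k => (k, (ks.count k : Int)))) t = apply1 ks t := by
  induction ks using List.reverseRecOn generalizing t with
  | nil => rfl
  | append_singleton ks k ih =>
    have hof : PySem.Set.ofList (ks ++ [k])
        = if k ∈ PySem.Set.ofList ks then PySem.Set.ofList ks
          else PySem.Set.ofList ks ++ [k] := by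
      simp [PySem.Set.ofList_eq_foldl, List.foldl_append, PySem.Set.add, PySem.Set.contains]
    have hcnt : ∀ q : Int × Int × Int, (ks ++ [k]).count q
        = ks.count q + if k = q then 1 else 0 := by
      intro q
      simp [List.count_append, List.count_singleton]
    have h1 : apply1 (ks ++ [k]) t = bumpCell (apply1 ks t) k.1 k.2.1 k.2.2 1 := by
      simp [apply1, List.foldl_append]
    by_cases hk : k ∈ ks
    · -- k already occurs: same key set, k's count goes up by one
      rw [hof, if_pos ((PySem.Set.mem_ofList ks k).2 hk)]
      obtain ⟨xs, ys, hsplit⟩ := List.append_of_mem ((PySem.Set.mem_ofList ks k).2 hk)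
      have hnd := PySem.Set.nodup_ofList ks
      rw [hsplit] at hnd
      have hkxs : k ∉ xs := by
        intro hx
        exact (List.disjoint_of_nodup_append hnd) hx List.mem_cons_self
      have hkys : k ∉ ys := by
        have := (List.nodup_append.1 hnd).2.1
        simp [List.nodup_cons] at this
        exact this.1
      have hmapxs : xs.map (fun q => (q, ((ks ++ [k]).count q : Int)))
          = xs.map (fun q => (q, (ks.count q : Int))) := by
        apply List.map_congr_left
        intro q hq
        have hne : k ≠ q := fun h => hkxs (h ▸ hq)
        simp [hcnt, hne]
      have hmapys : ys.map (fun q => (q, ((ks ++ [k]).count q : Int)))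
          = ys.map (fun q => (q, (ks.count q : Int))) := by
        apply List.map_congr_left
        intro q hq
        have hne : k ≠ q := fun h => hkys (h ▸ hq)
        simp [hcnt, hne]
      have hck : ((ks ++ [k]).count k : Int) = (ks.count k : Int) + 1 := by
        rw [hcnt]; simp
      rw [hsplit]
      simp only [List.map_append, List.map_cons, hmapxs, hmapys, hck]
      simp only [applyC, List.foldl_append, List.foldl_cons]
      rw [bumpCell_split]
      have hcm : ∀ (Q : List ((Int × Int × Int) × Int)) (T : List (List (List Int))),
          Q.foldl (fun t kc => bumpCell t kc.1.1 kc.1.2.1 kc.1.2.2 kc.2)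
              (bumpCell T k.1 k.2.1 k.2.2 1)
            = bumpCell (Q.foldl (fun t kc => bumpCell t kc.1.1 kc.1.2.1 kc.1.2.2 kc.2) T)
                k.1 k.2.1 k.2.2 1 := by
        intro Q T
        exact applyC_bump_comm Q T k.1 k.2.1 k.2.2 1
      rw [hcm, h1]
      have := ih t
      rw [hsplit] at this
      simp only [List.map_append, List.map_cons, applyC, List.foldl_append,
        List.foldl_cons] at this
      rw [this]
    · -- new key: appended at the end with count 1
      have hknot : k ∉ PySem.Set.ofList ks := fun h => hk ((PySem.Set.mem_ofList ks k).1 h)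
      rw [hof, if_neg hknot]
      have hmap : (PySem.Set.ofList ks).map (fun q => (q, ((ks ++ [k]).count q : Int)))
          = (PySem.Set.ofList ks).map (fun q => (q, (ks.count q : Int))) := by
        apply List.map_congr_left
        intro q hq
        have hne : k ≠ q := fun h => hknot (h ▸ hq)
        simp [hcnt, hne]
      have hck : ((ks ++ [k]).count k : Int) = 1 := by
        rw [hcnt]
        simp [List.count_eq_zero_of_not_mem hk]
      simp only [List.map_append, List.map_cons, List.map_nil, hmap, hck]
      simp only [applyC, List.foldl_append, List.foldl_cons, List.foldl_nil]
      rw [h1]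
      have := ih t
      simp only [applyC] at this
      rw [this]

-- A's index loop = fold over the zipped pixel/mask pairs (mask long enough)
theorem range_fold_eq_zip {σ : Type} (as ms : List (Int × Int × Int))
    (F : σ → (Int × Int × Int) → (Int × Int × Int) → σ) (st : σ)
    (h : as.length ≤ ms.length) :
    (List.range as.length).foldl (fun st i => F st (as.getD i (0, 0, 0)) (ms.getD i (0, 0, 0))) st
      = (as.zip ms).foldl (fun st p => F st p.1 p.2) st := by
  induction as generalizing ms st with
  | nil => rfl
  | cons a as ih =>
    cases ms with
    | nil => simp at h
    | cons m ms =>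
      simp only [List.length_cons, List.range_succ_eq_map, List.foldl_cons, List.foldl_map,
        List.getD_cons_succ, List.getD_cons_zero, List.zip_cons_cons]
      exact ih ms _ (by simpa using h)

-- A's interleaved pair-state fold, componentwise
theorem pairFoldA (es : List ((Int × Int × Int) × (Int × Int × Int))) (s n : List (List (List Int))) :
    es.foldl (fun (st : List (List (List Int)) × List (List (List Int))) p =>
        if check_skin p.2 then (bumpCell st.1 p.1.1 p.1.2.1 p.1.2.2 1, st.2)
        else (st.1, bumpCell st.2 p.1.1 p.1.2.1 p.1.2.2 1)) (s, n)
      = (apply1 ((es.filter (fun p => check_skin p.2)).map Prod.fst) s,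
         apply1 ((es.filter (fun p => !check_skin p.2)).map Prod.fst) n) := by
  induction es generalizing s n with
  | nil => rfl
  | cons e es ih =>
    by_cases he : check_skin e.2 <;>
      simp [he, apply1, ih]

-- B's interleaved pair-state dict fold, componentwise
theorem pairFoldB (es : List ((Int × Int × Int) × (Int × Int × Int)))
    (d1 d2 : PySem.Dict (Int × Int × Int) Int) :
    es.foldl (fun (dd : PySem.Dict (Int × Int × Int) Int × PySem.Dict (Int × Int × Int) Int) pm =>
        let k := (pm.1.1, pm.1.2.1, pm.1.2.2)
        if check_skin pm.2 then (dd.1.insert k (dd.1.getD k 0 + 1), dd.2)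
        else (dd.1, dd.2.insert k (dd.2.getD k 0 + 1))) (d1, d2)
      = (((es.filter (fun p => check_skin p.2)).map Prod.fst).foldl
           (fun d x => d.insert x (d.getD x 0 + 1)) d1,
         ((es.filter (fun p => !check_skin p.2)).map Prod.fst).foldl
           (fun d x => d.insert x (d.getD x 0 + 1)) d2) := by
  induction es generalizing d1 d2 with
  | nil => rfl
  | cons e es ih =>
    by_cases he : check_skin e.2 <;>
      simp [he, ih]

-- ===== VERDICT (by name: the statement is the Claim_ definition above) =====
theorem train_data_spec : Claim_equal_train_data := by
  intro pixels actual mask skin non hDom hPre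
  unfold Spec_train_data
  obtain ⟨hlen, -⟩ := hPre
  have hA : train_data pixels actual mask skin non
      = (pixels,
         apply1 (((actual.zip mask).filter (fun p => check_skin p.2)).map Prod.fst) skin,
         apply1 (((actual.zip mask).filter (fun p => !check_skin p.2)).map Prod.fst) non) := by
    simp only [train_data]
    rw [PySem.List.pyRange_zero_natCast, List.foldl_map]
    simp only [PySem.List.pyGetD_natCast]
    rw [range_fold_eq_zip actual mask
      (fun st a m => if check_skin m then (bumpCell st.1 a.1 a.2.1 a.2.2 1, st.2)
        else (st.1, bumpCell st.2 a.1 a.2.1 a.2.2 1)) (skin, non) hlen]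
    rw [pairFoldA]
  have e1 := counter_apply (((actual.zip mask).filter (fun p => check_skin p.2)).map Prod.fst) skin
  have e2 := counter_apply (((actual.zip mask).filter (fun p => !check_skin p.2)).map Prod.fst) non
  simp only [applyC] at e1 e2
  have hB : train_data_alt pixels actual mask skin non
      = (pixels,
         apply1 (((actual.zip mask).filter (fun p => check_skin p.2)).map Prod.fst) skin,
         apply1 (((actual.zip mask).filter (fun p => !check_skin p.2)).map Prod.fst) non) := by
    simp only [train_data_alt]
    rw [pairFoldB]
    rw [PySem.Dict.foldl_insert_getD_add_one_eq_counter,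
      PySem.Dict.foldl_insert_getD_add_one_eq_counter,
      PySem.Dict.items_counter, PySem.Dict.items_counter]
    rw [e1, e2]
  rw [hA, hB]
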